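-- pv_equiv track=rewrite | github.com/kanatakayasu/apriori-window | paper/K-pharmacoepidemiology/implementation/python/pharma_dense_miner.py | compute_support_time_series
-- ===== SOURCE A (Python) =====
-- from bisect import bisect_left, bisect_right
-- from typing import Dict, List, Optional, Sequence, Tuple
--
-- def compute_support_time_series(
--     timestamps: Sequence[int],
--     n_transactions: int,
--     window_size: int,
-- ) -> List[int]:
--     """
--     Compute the support time series for a pattern.
--
--     s_P(t) = number of occurrences in [t, t + window_size)
--
--     Returns a list of length (n_transactions - window_size + 1).
--     """
--     if window_size < 1 or n_transactions < window_size: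
--         return []
--
--     ts = list(timestamps)
--     series = []
--     for t in range(n_transactions - window_size + 1):
--         start_idx = bisect_left(ts, t)
--         end_idx = bisect_left(ts, t + window_size)
--         series.append(end_idx - start_idx)
--
--     return series
-- ===== SOURCE B (Python) =====
-- def compute_support_time_series(timestamps, n_transactions, window_size):
--     """Sliding-window recurrence: build a frequency dict once, then update the
--     window count incrementally instead of binary-searching at each step."""
--     if window_size < 1 or n_transactions < window_size:
--         return []
--     counts = {}
--     for x in timestamps:
--         counts[x] = counts.get(x, 0) + 1
--     cur = 0
--     for x in timestamps:
--         if 0 <= x < window_size: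
--             cur += 1
--     series = [cur]
--     for t in range(1, n_transactions - window_size + 1):
--         cur += counts.get(t - 1 + window_size, 0) - counts.get(t - 1, 0)
--         series.append(cur)
--     return series
-- ===== Notes on version B (the rewrite author's own statement) =====
-- stated objective: alternative
-- what changed: Replaced the two binary searches per window position with a frequency dictionary built once plus a sliding-window recurrence s(t) = s(t-1) - count(t-1) + count(t-1+window_size); asymptotically O(N+M) vs O(N+M log N), but not measurably faster in CPython since bisect is C-coded.
-- outside the precondition, e.g. on compute_support_time_series([2, 0, 1], 3, 1): A returns [2, 1, 0], B returns [1, 1, 1]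
import Mathlib
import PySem

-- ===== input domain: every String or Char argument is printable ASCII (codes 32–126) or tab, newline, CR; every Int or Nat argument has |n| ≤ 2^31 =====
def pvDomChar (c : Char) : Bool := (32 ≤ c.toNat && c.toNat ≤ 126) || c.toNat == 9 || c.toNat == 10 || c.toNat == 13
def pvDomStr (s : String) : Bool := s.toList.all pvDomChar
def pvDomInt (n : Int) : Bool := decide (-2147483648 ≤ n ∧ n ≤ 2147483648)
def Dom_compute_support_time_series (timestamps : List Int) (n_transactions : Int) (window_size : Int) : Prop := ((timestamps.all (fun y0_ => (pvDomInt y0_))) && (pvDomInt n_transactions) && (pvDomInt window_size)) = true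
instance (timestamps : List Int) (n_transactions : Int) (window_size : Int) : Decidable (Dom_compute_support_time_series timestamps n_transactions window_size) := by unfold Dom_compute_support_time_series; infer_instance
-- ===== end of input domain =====

-- B replaces the two binary searches per window position with a frequency dict built once
-- plus a sliding-window recurrence (objective: alternative algorithm of similar cost).

-- ===== PORT A =====
def compute_support_time_series (timestamps : List Int) (n_transactions : Int) (window_size : Int) : List Int :=
  if window_size < 1 ∨ n_transactions < window_size then []
  else
    let ts := timestamps
    (PySem.List.pyRange 0 (n_transactions - window_size + 1) 1).foldl
      (fun series t =>
        let start_idx := PySem.List.bisectLeft ts t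
        let end_idx := PySem.List.bisectLeft ts (t + window_size)
        series ++ [(end_idx : Int) - (start_idx : Int)]) []

-- ===== PORT B =====
def compute_support_time_series_alt (timestamps : List Int) (n_transactions : Int) (window_size : Int) : List Int :=
  if window_size < 1 ∨ n_transactions < window_size then []
  else
    let counts := timestamps.foldl (fun d x => d.insert x (d.getD x 0 + 1))
      (PySem.Dict.empty (κ := Int) (ν := Int))
    let cur : Int := timestamps.foldl
      (fun c x => if 0 ≤ x ∧ x < window_size then c + 1 else c) 0
    let res := (PySem.List.pyRange 1 (n_transactions - window_size + 1) 1).foldl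
      (fun (p : Int × List Int) t =>
        let c := p.1 + (counts.getD (t - 1 + window_size) 0 - counts.getD (t - 1) 0)
        (c, p.2 ++ [c])) (cur, [cur])
    res.2

-- ===== PRECONDITION & SPEC =====
-- bisect_left assumes its list is sorted; on an unsorted timestamps list (when a nonempty
-- series is produced) A's values are accidental artefacts of binary search on unsorted data,
-- so Pre_ requires the timestamps to be sorted non-decreasingly whenever the guard passes.
def Pre_compute_support_time_series (timestamps : List Int) (n_transactions : Int) (window_size : Int) : Prop :=
  window_size < 1 ∨ n_transactions < window_size ∨ List.Pairwise (· ≤ ·) timestamps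
instance (timestamps : List Int) (n_transactions : Int) (window_size : Int) : Decidable (Pre_compute_support_time_series timestamps n_transactions window_size) := by unfold Pre_compute_support_time_series; infer_instance
def pvWitness_compute_support_time_series : List Int × Int × Int := ([0, 1, 1, 3], 4, 2)

def Spec_compute_support_time_series (timestamps : List Int) (n_transactions : Int) (window_size : Int) (out : List Int) : Prop := out = compute_support_time_series_alt timestamps n_transactions window_size
instance (timestamps : List Int) (n_transactions : Int) (window_size : Int) (out : List Int) : Decidable (Spec_compute_support_time_series timestamps n_transactions window_size out) := by unfold Spec_compute_support_time_series; infer_instance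

-- ===== CLAIM (what is proved, stated in full; the proofs are below) =====
def Claim_equal_compute_support_time_series : Prop := ∀ (timestamps : List Int) (n_transactions : Int) (window_size : Int), Dom_compute_support_time_series timestamps n_transactions window_size → Pre_compute_support_time_series timestamps n_transactions window_size → Spec_compute_support_time_series timestamps n_transactions window_size (compute_support_time_series timestamps n_transactions window_size)

-- ===== LEMMAS AND PROOFS =====

-- the number of timestamps in the window [t, t + w), as an Int
def pvWinCount (ts : List Int) (w t : Int) : Int :=
  (ts.countP (fun y => decide (t ≤ y) && decide (y < t + w)) : Int)

-- on a sorted list, bisect_left returns the number of elements below the probe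
lemma pv_bisectLeft_eq_countP (ts : List Int) (x : Int)
    (hs : List.Pairwise (· ≤ ·) ts) :
    PySem.List.bisectLeft ts x = ts.countP (fun y => decide (y < x)) := by
  obtain ⟨hle, hlt, hge⟩ := PySem.List.bisectLeft_spec ts x hs
  set k := PySem.List.bisectLeft ts x with hk
  have hsplit : ts = ts.take k ++ ts.drop k := (List.take_append_drop k ts).symm
  have h1 : (ts.take k).countP (fun y => decide (y < x)) = k := by
    have hall : ∀ a ∈ ts.take k, (fun y => decide (y < x)) a = true := by
      intro a ha
      obtain ⟨i, hi, hget⟩ := List.getElem_of_mem ha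
      have hik : i < k ∧ i < ts.length := by
        have := hi; simp only [List.length_take] at this; omega
      have : ts[i] < x := hlt i hik.2 hik.1
      simp only [List.getElem_take] at hget
      simpa [hget] using this
    have := List.countP_eq_length.2 hall
    simp only [List.length_take] at this
    omega
  have h2 : (ts.drop k).countP (fun y => decide (y < x)) = 0 := by
    apply List.countP_eq_zero.2
    intro a ha
    obtain ⟨i, hi, hget⟩ := List.getElem_of_mem ha
    have hilen : k + i < ts.length := by
      have := hi; simp only [List.length_drop] at this; omega
    have hx : x ≤ ts[k + i] := hge (k + i) hilen (by omega)
    simp only [List.getElem_drop] at hget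
    simp [← hget]; omega
  conv_rhs => rw [hsplit]
  rw [List.countP_append, h1, h2]
  omega

-- splitting the count of elements below t + w at t (Nat level)
lemma pv_countP_window_split (ts : List Int) (t w : Int) (hw : 1 ≤ w) :
    ts.countP (fun y => decide (y < t + w)) =
      ts.countP (fun y => decide (y < t)) +
        ts.countP (fun y => decide (t ≤ y) && decide (y < t + w)) := by
  induction ts with
  | nil => simp
  | cons a l ih =>
    simp only [List.countP_cons, Bool.and_eq_true, decide_eq_true_eq]
    split_ifs <;> omega

-- sliding the window one step right exchanges the two boundary element counts (Nat level)
lemma pv_winCount_step_nat (ts : List Int) (w t : Int) (hw : 1 ≤ w) :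
    ts.countP (fun y => decide (t ≤ y) && decide (y < t + w)) + ts.count (t - 1) =
      ts.countP (fun y => decide (t - 1 ≤ y) && decide (y < t - 1 + w)) +
        ts.count (t - 1 + w) := by
  induction ts with
  | nil => simp
  | cons a l ih =>
    simp only [List.countP_cons, List.count_cons, Bool.and_eq_true, decide_eq_true_eq,
      beq_iff_eq]
    split_ifs <;> omega

-- B's main loop: starting from the window count at a - 1, the fold over range(a, b)
-- appends exactly the window counts at a, a+1, …, b-1
lemma pv_bloop (ts : List Int) (w : Int) (hw : 1 ≤ w)
    (g : Int → Int) (hg : ∀ v, g v = (ts.count v : Int)) :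
    ∀ (n : Nat) (a : Int) (ser : List Int),
    (PySem.List.pyRange a (a + n) 1).foldl
        (fun (p : Int × List Int) t =>
          let c := p.1 + (g (t - 1 + w) - g (t - 1))
          (c, p.2 ++ [c])) (pvWinCount ts w (a - 1), ser) =
      (pvWinCount ts w (a + n - 1),
       ser ++ (PySem.List.pyRange a (a + n) 1).map (fun t => pvWinCount ts w t)) := by
  intro n
  induction n with
  | zero =>
    intro a ser
    simp [PySem.List.pyRange_one_eq_nil (le_refl a)]
  | succ m ih =>
    intro a ser
    have hlt : a < a + (m + 1 : Nat) := by push_cast; omega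
    rw [PySem.List.pyRange_one_cons hlt]
    simp only [List.foldl_cons, List.map_cons]
    have hstep : pvWinCount ts w (a - 1) + (g (a - 1 + w) - g (a - 1)) = pvWinCount ts w a := by
      rw [hg, hg]
      have := pv_winCount_step_nat ts w a hw
      simp only [pvWinCount]
      omega
    have harg : a + (m + 1 : Nat) = (a + 1) + (m : Nat) := by push_cast; omega
    rw [harg]
    have := ih (a + 1) (ser ++ [pvWinCount ts w a])
    simp only [add_sub_cancel_right] at this
    simp only [hstep]
    rw [this]
    simp

-- ===== VERDICT =====
theorem compute_support_time_series_spec : Claim_equal_compute_support_time_series := by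
  intro ts n w _ hpre
  unfold Spec_compute_support_time_series
  unfold compute_support_time_series compute_support_time_series_alt
  by_cases hguard : w < 1 ∨ n < w
  · simp [hguard]
  · simp only [if_neg hguard]
    have hw : 1 ≤ w := by omega
    have hs : List.Pairwise (· ≤ ·) ts := by
      rcases hpre with h | h | h
      · omega
      · omega
      · exact h
    -- A's side: a map of bisect differences = a map of window counts
    have hA : ∀ t : Int,
        ((PySem.List.bisectLeft ts (t + w) : Int) - (PySem.List.bisectLeft ts t : Int)) =
          pvWinCount ts w t := by
      intro t
      rw [pv_bisectLeft_eq_countP ts (t + w) hs, pv_bisectLeft_eq_countP ts t hs]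
      have := pv_countP_window_split ts t w hw
      simp only [pvWinCount]
      omega
    rw [PySem.List.foldl_append_singleton_eq_map
      (fun t => (PySem.List.bisectLeft ts (t + w) : Int) - (PySem.List.bisectLeft ts t : Int))]
    -- B's side
    have hg : ∀ v : Int,
        (ts.foldl (fun d x => d.insert x (d.getD x 0 + 1))
          (PySem.Dict.empty (κ := Int) (ν := Int))).getD v 0 = (ts.count v : Int) := by
      intro v
      rw [PySem.Dict.getD_foldl_insert_add_one]
      simp
    have hcur : ts.foldl (fun c x => if 0 ≤ x ∧ x < w then c + 1 else c) (0 : Int) =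
        pvWinCount ts w 0 := by
      have := PySem.List.foldl_count_if (fun x => decide (0 ≤ x ∧ x < w)) ts 0
      simp only [decide_eq_true_eq] at this
      simp [pvWinCount, this]
    have hone : (1 : Int) + ((n - w + 1 - 1).toNat : Int) = n - w + 1 := by omega
    have hb := pv_bloop ts w hw
      (fun v => (ts.foldl (fun d x => d.insert x (d.getD x 0 + 1))
        (PySem.Dict.empty (κ := Int) (ν := Int))).getD v 0) hg
      (n - w + 1 - 1).toNat 1 [pvWinCount ts w 0]
    rw [hone] at hb
    simp only [hcur]
    have hzero : pvWinCount ts w (1 - 1) = pvWinCount ts w 0 := by norm_num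
    rw [hzero] at hb
    simp only [hb]
    -- both are maps of pvWinCount over ranges; combine [0] ++ range(1, m)
    have hm : (0 : Int) ≤ 1 := by omega
    have hm2 : (1 : Int) ≤ n - w + 1 := by omega
    rw [PySem.List.pyRange_one_append 0 1 (n - w + 1) hm hm2]
    have h01 : PySem.List.pyRange 0 1 1 = [0] := by decide
    simp [h01, hA]
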